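-- pv_equiv track=rewrite | github.com/valentinych/draft-app | scripts/fix_formations_from_lineups.py | detect_formation
-- ===== SOURCE A (Python) =====
-- def detect_formation(players, fpl_players):
--     """Определяет схему на основе фактического распределения"""
--     gk = sum(1 for pid in players if 1 <= pid <= 1000 and fpl_players.get(pid, {}).get('position') == 'Goalkeeper')
--     def_count = sum(1 for pid in players if 1 <= pid <= 1000 and fpl_players.get(pid, {}).get('position') == 'Defender')
--     mid_count = sum(1 for pid in players if 1 <= pid <= 1000 and fpl_players.get(pid, {}).get('position') == 'Midfielder')
--     fwd_count = sum(1 for pid in players if 1 <= pid <= 1000 and fpl_players.get(pid, {}).get('position') == 'Forward')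
--
--     if gk == 1:
--         if def_count == 3 and mid_count == 4 and fwd_count == 3:
--             return "3-4-3"
--         elif def_count == 3 and mid_count == 5 and fwd_count == 2:
--             return "3-5-2"
--         elif def_count == 4 and mid_count == 3 and fwd_count == 3:
--             return "4-3-3"
--         elif def_count == 4 and mid_count == 4 and fwd_count == 2:
--             return "4-4-2"
--         elif def_count == 4 and mid_count == 5 and fwd_count == 1:
--             return "4-5-1"
--         elif def_count == 5 and mid_count == 3 and fwd_count == 2:
--             return "5-3-2"
--         elif def_count == 5 and mid_count == 4 and fwd_count == 1:
--             return "5-4-1"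
--         else:
--             return f"{def_count}-{mid_count}-{fwd_count}"
--     return f"{def_count}-{mid_count}-{fwd_count}"
-- ===== SOURCE B (Python) =====
-- def detect_formation(players, fpl_players):
--     """Single pass over players tallying outfield positions; every branch of A's
--     if/elif ladder returns exactly f"{def}-{mid}-{fwd}", so B returns that directly."""
--     d = m = f = 0
--     for pid in players:
--         if 1 <= pid <= 1000:
--             pos = fpl_players.get(pid, {}).get('position')
--             if pos == 'Defender':
--                 d += 1
--             elif pos == 'Midfielder':
--                 m += 1
--             elif pos == 'Forward':
--                 f += 1
--     return f"{d}-{m}-{f}"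
-- ===== Notes on version B (the rewrite author's own statement) =====
-- stated objective: simpler
-- what changed: One pass tallying defender/midfielder/forward counts replaces four full scans, and the entire gk==1 if/elif ladder is dropped because every named formation string equals the fallback f'{def}-{mid}-{fwd}' anyway.
import Mathlib
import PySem

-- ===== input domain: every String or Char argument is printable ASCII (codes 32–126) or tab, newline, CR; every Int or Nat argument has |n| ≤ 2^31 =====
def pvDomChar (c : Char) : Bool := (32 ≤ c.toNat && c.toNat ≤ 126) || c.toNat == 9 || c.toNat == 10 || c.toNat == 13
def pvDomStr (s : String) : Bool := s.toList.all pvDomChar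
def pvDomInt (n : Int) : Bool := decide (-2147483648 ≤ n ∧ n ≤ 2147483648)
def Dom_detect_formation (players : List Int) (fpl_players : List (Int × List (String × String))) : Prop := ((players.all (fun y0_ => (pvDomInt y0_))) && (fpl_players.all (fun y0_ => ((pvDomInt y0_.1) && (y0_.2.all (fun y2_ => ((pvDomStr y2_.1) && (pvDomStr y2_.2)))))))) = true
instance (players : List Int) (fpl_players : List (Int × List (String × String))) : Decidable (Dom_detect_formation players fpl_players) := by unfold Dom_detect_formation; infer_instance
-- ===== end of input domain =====

-- B changes: one tallying pass instead of four scans, and the if/elif ladder is dropped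
-- since every named formation string equals the fallback f"{def}-{mid}-{fwd}" (objective: simpler).

-- shared primitive: fpl_players.get(pid, {}).get('position')
def pvGetPos (fpl : List (Int × List (String × String))) (pid : Int) : Option String :=
  PySem.Dict.get? (PySem.Dict.mk (PySem.Dict.getD (PySem.Dict.mk fpl) pid [])) "position"

-- ===== PORT A =====
def detect_formation (players : List Int) (fpl_players : List (Int × List (String × String))) : String :=
  let gk := players.foldl (fun a pid => if decide (1 ≤ pid ∧ pid ≤ 1000) && (pvGetPos fpl_players pid == some "Goalkeeper") then a + 1 else a) (0 : Int)
  let def_count := players.foldl (fun a pid => if decide (1 ≤ pid ∧ pid ≤ 1000) && (pvGetPos fpl_players pid == some "Defender") then a + 1 else a) (0 : Int)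
  let mid_count := players.foldl (fun a pid => if decide (1 ≤ pid ∧ pid ≤ 1000) && (pvGetPos fpl_players pid == some "Midfielder") then a + 1 else a) (0 : Int)
  let fwd_count := players.foldl (fun a pid => if decide (1 ≤ pid ∧ pid ≤ 1000) && (pvGetPos fpl_players pid == some "Forward") then a + 1 else a) (0 : Int)
  let fmt := PySem.Int.toStr def_count ++ "-" ++ PySem.Int.toStr mid_count ++ "-" ++ PySem.Int.toStr fwd_count
  if gk == 1 then
    if def_count == 3 && mid_count == 4 && fwd_count == 3 then "3-4-3"
    else if def_count == 3 && mid_count == 5 && fwd_count == 2 then "3-5-2"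
    else if def_count == 4 && mid_count == 3 && fwd_count == 3 then "4-3-3"
    else if def_count == 4 && mid_count == 4 && fwd_count == 2 then "4-4-2"
    else if def_count == 4 && mid_count == 5 && fwd_count == 1 then "4-5-1"
    else if def_count == 5 && mid_count == 3 && fwd_count == 2 then "5-3-2"
    else if def_count == 5 && mid_count == 4 && fwd_count == 1 then "5-4-1"
    else fmt
  else fmt

-- ===== PORT B =====
def detect_formation_alt (players : List Int) (fpl_players : List (Int × List (String × String))) : String :=
  let t := players.foldl (fun (s : Int × Int × Int) pid =>
    if decide (1 ≤ pid ∧ pid ≤ 1000) then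
      let pos := pvGetPos fpl_players pid
      if pos == some "Defender" then (s.1 + 1, s.2.1, s.2.2)
      else if pos == some "Midfielder" then (s.1, s.2.1 + 1, s.2.2)
      else if pos == some "Forward" then (s.1, s.2.1, s.2.2 + 1)
      else s
    else s) (0, 0, 0)
  PySem.Int.toStr t.1 ++ "-" ++ PySem.Int.toStr t.2.1 ++ "-" ++ PySem.Int.toStr t.2.2

-- ===== PRECONDITION & SPEC =====
def Spec_detect_formation (players : List Int) (fpl_players : List (Int × List (String × String))) (out : String) : Prop := out = detect_formation_alt players fpl_players
instance (players : List Int) (fpl_players : List (Int × List (String × String))) (out : String) : Decidable (Spec_detect_formation players fpl_players out) := by unfold Spec_detect_formation; infer_instance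

-- ===== CLAIM (what is proved, stated in full; the proofs are below) =====
def Claim_equal_detect_formation : Prop := ∀ (players : List Int) (fpl_players : List (Int × List (String × String))), Dom_detect_formation players fpl_players → Spec_detect_formation players fpl_players (detect_formation players fpl_players)

-- ===== LEMMAS AND PROOFS =====

-- B's single fold computes A's three separate counting folds.
theorem pv_fold_eq (fpl : List (Int × List (String × String))) (players : List Int)
    (d m f : Int) :
    players.foldl (fun (s : Int × Int × Int) pid =>
      if decide (1 ≤ pid ∧ pid ≤ 1000) then
        let pos := pvGetPos fpl pid
        if pos == some "Defender" then (s.1 + 1, s.2.1, s.2.2)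
        else if pos == some "Midfielder" then (s.1, s.2.1 + 1, s.2.2)
        else if pos == some "Forward" then (s.1, s.2.1, s.2.2 + 1)
        else s
      else s) (d, m, f)
    = (players.foldl (fun a pid => if decide (1 ≤ pid ∧ pid ≤ 1000) && (pvGetPos fpl pid == some "Defender") then a + 1 else a) d,
       players.foldl (fun a pid => if decide (1 ≤ pid ∧ pid ≤ 1000) && (pvGetPos fpl pid == some "Midfielder") then a + 1 else a) m,
       players.foldl (fun a pid => if decide (1 ≤ pid ∧ pid ≤ 1000) && (pvGetPos fpl pid == some "Forward") then a + 1 else a) f) := by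
  induction players generalizing d m f with
  | nil => rfl
  | cons p ps ih =>
    simp only [List.foldl_cons]
    by_cases hr : decide (1 ≤ p ∧ p ≤ 1000) = true
    · rw [hr]
      simp only [Bool.true_and, reduceIte]
      rcases hD : (pvGetPos fpl p == some "Defender") with _ | _
      · rcases hM : (pvGetPos fpl p == some "Midfielder") with _ | _
        · rcases hF : (pvGetPos fpl p == some "Forward") with _ | _
          · exact ih d m f
          · simp only [reduceIte]; exact ih d m (f + 1)
        · have hF : (pvGetPos fpl p == some "Forward") = false := by
            rw [eq_of_beq hM]; decide
          rw [hF]; simp only [reduceIte]; exact ih d (m + 1) f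
      · have hM : (pvGetPos fpl p == some "Midfielder") = false := by
          rw [eq_of_beq hD]; decide
        have hF : (pvGetPos fpl p == some "Forward") = false := by
          rw [eq_of_beq hD]; decide
        rw [hM, hF]; simp only [reduceIte]; exact ih (d + 1) m f
    · rw [Bool.not_eq_true] at hr
      rw [hr]
      simp only [Bool.false_and]
      exact ih d m f

-- A's if/elif ladder always returns the formatted count string.
theorem pv_ladder (g d m f : Int) :
    (if g == 1 then
      if d == 3 && m == 4 && f == 3 then "3-4-3"
      else if d == 3 && m == 5 && f == 2 then "3-5-2"
      else if d == 4 && m == 3 && f == 3 then "4-3-3"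
      else if d == 4 && m == 4 && f == 2 then "4-4-2"
      else if d == 4 && m == 5 && f == 1 then "4-5-1"
      else if d == 5 && m == 3 && f == 2 then "5-3-2"
      else if d == 5 && m == 4 && f == 1 then "5-4-1"
      else PySem.Int.toStr d ++ "-" ++ PySem.Int.toStr m ++ "-" ++ PySem.Int.toStr f
    else PySem.Int.toStr d ++ "-" ++ PySem.Int.toStr m ++ "-" ++ PySem.Int.toStr f)
    = PySem.Int.toStr d ++ "-" ++ PySem.Int.toStr m ++ "-" ++ PySem.Int.toStr f := by
  split_ifs with h0 h1 h2 h3 h4 h5 h6 h7 <;> try rfl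
  all_goals
    first
    | (simp only [Bool.and_eq_true, beq_iff_eq] at h1; obtain ⟨⟨hd, hm⟩, hf⟩ := h1; subst hd; subst hm; subst hf; decide)
    | (simp only [Bool.and_eq_true, beq_iff_eq] at h2; obtain ⟨⟨hd, hm⟩, hf⟩ := h2; subst hd; subst hm; subst hf; decide)
    | (simp only [Bool.and_eq_true, beq_iff_eq] at h3; obtain ⟨⟨hd, hm⟩, hf⟩ := h3; subst hd; subst hm; subst hf; decide)
    | (simp only [Bool.and_eq_true, beq_iff_eq] at h4; obtain ⟨⟨hd, hm⟩, hf⟩ := h4; subst hd; subst hm; subst hf; decide)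
    | (simp only [Bool.and_eq_true, beq_iff_eq] at h5; obtain ⟨⟨hd, hm⟩, hf⟩ := h5; subst hd; subst hm; subst hf; decide)
    | (simp only [Bool.and_eq_true, beq_iff_eq] at h6; obtain ⟨⟨hd, hm⟩, hf⟩ := h6; subst hd; subst hm; subst hf; decide)
    | (simp only [Bool.and_eq_true, beq_iff_eq] at h7; obtain ⟨⟨hd, hm⟩, hf⟩ := h7; subst hd; subst hm; subst hf; decide)

-- ===== VERDICT (by name: the statement is the Claim_ definition above) =====
theorem detect_formation_spec : Claim_equal_detect_formation := by
  intro players fpl _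
  unfold Spec_detect_formation detect_formation detect_formation_alt
  simp only [pv_fold_eq, pv_ladder]
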